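-- pv_equiv track=rewrite | github.com/omerkeles15/ofk | backend/main.py | _get_delta_y_addresses
-- ===== SOURCE A (Python) =====
-- def _get_delta_y_addresses(count):
--     """Delta DVP Y adresleri üret — oktal gruplama kuralı."""
--     addrs = []
--     if count <= 0:
--         return addrs
--     for i in range(6):
--         if len(addrs) >= count:
--             break
--         addrs.append(f"Y{i}")
--     group = 2
--     while len(addrs) < count:
--         if group % 10 in (8, 9):
--             group += 1
--             continue
--         base = group * 10
--         for i in range(8):
--             if len(addrs) >= count:
--                 break
--             addrs.append(f"Y{base + i}")
--         group += 1
--     return addrs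
-- ===== SOURCE B (Python) =====
-- def _get_delta_y_addresses(count):
--     """Delta DVP Y adresleri uret - her adresi indeksinden kapali formla hesaplar."""
--     addrs = []
--     for k in range(count):
--         if k < 6:
--             addrs.append(f"Y{k}")
--         else:
--             m = k - 6
--             g = m // 8 + 2
--             addrs.append(f"Y{(g // 8 * 10 + g % 8) * 10 + m % 8}")
--     return addrs
-- ===== Notes on version B (the rewrite author's own statement) =====
-- stated objective: alternative
-- what changed: Replaces the preamble loop plus skip-groups-of-8 while loop with a single pass over range(count) that computes the k-th address directly by a closed-form index formula (k-th valid group/offset via div/mod by 8).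
import Mathlib
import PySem

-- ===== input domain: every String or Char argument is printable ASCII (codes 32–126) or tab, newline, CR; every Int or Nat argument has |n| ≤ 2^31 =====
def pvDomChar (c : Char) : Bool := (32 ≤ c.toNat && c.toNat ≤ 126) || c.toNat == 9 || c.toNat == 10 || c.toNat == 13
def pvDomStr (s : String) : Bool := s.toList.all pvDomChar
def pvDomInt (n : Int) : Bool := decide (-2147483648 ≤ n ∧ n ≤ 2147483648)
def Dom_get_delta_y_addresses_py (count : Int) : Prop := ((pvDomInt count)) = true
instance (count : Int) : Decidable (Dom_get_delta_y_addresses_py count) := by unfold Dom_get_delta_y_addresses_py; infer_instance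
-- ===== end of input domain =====

-- B replaces A's preamble loop + group-skipping while loop by one pass over range(count)
-- computing each address from its index by a closed div/mod-by-8 formula; same output, similar cost.

-- ===== PORT A =====
-- A's two loops share the shape "if len(addrs) >= count: break; addrs.append(Y…)"; this is that step.
def pvGuardStep (count : Int) (g : Int → String) (a : List String) (i : Int) : List String :=
  if (a.length : Int) ≥ count then a else a ++ [g i]

-- the 'while len(addrs) < count' loop of A (fuel only makes the loop total; it is
-- chosen large enough -- see pvWhileA_eq/get_delta_y_addresses_py_spec -- and never runs out)
def pvWhileA (fuel : Nat) (count : Int) (addrs : List String) (group : Int) : List String :=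
  match fuel with
  | 0 => addrs
  | fuel + 1 =>
    if (addrs.length : Int) < count then
      if PySem.Int.mod group 10 = 8 ∨ PySem.Int.mod group 10 = 9 then
        pvWhileA fuel count addrs (group + 1)
      else
        pvWhileA fuel count
          ((PySem.List.pyRange 0 8 1).foldl
            (pvGuardStep count (fun i => "Y" ++ PySem.Int.toStr (group * 10 + i))) addrs)
          (group + 1)
    else addrs

def get_delta_y_addresses_py (count : Int) : List String :=
  if count ≤ 0 then []
  else
    pvWhileA (3 * count.toNat + 3) count
      ((PySem.List.pyRange 0 6 1).foldl
        (pvGuardStep count (fun i => "Y" ++ PySem.Int.toStr i)) []) 2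

-- ===== PORT B =====
def get_delta_y_addresses_py_alt (count : Int) : List String :=
  (PySem.List.pyRange 0 count 1).foldl
    (fun a k =>
      if k < 6 then a ++ ["Y" ++ PySem.Int.toStr k]
      else
        let m := k - 6
        let g := PySem.Int.floordiv m 8 + 2
        a ++ ["Y" ++ PySem.Int.toStr
          ((PySem.Int.floordiv g 8 * 10 + PySem.Int.mod g 8) * 10 + PySem.Int.mod m 8)])
    []

-- ===== PRECONDITION & SPEC =====
def Spec_get_delta_y_addresses_py (count : Int) (out : List String) : Prop := out = get_delta_y_addresses_py_alt count
instance (count : Int) (out : List String) : Decidable (Spec_get_delta_y_addresses_py count out) := by unfold Spec_get_delta_y_addresses_py; infer_instance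

-- ===== CLAIM (what is proved, stated in full; the proofs are below) =====
def Claim_equal_get_delta_y_addresses_py : Prop := ∀ (count : Int), Dom_get_delta_y_addresses_py count → Spec_get_delta_y_addresses_py count (get_delta_y_addresses_py count)

-- ===== LEMMAS AND PROOFS =====

-- characterisation of a guarded-append fold
theorem pvGuard_fold_eq (count : Int) (g : Int → String) :
    ∀ (xs : List Int) (a : List String),
      xs.foldl (pvGuardStep count g) a = a ++ ((xs.take (count - a.length).toNat).map g) := by
  intro xs
  induction xs with
  | nil => intro a; simp
  | cons x xs ih =>
    intro a
    simp only [List.foldl_cons, pvGuardStep]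
    by_cases h : (a.length : Int) ≥ count
    · have h0 : (count - (a.length : Int)).toNat = 0 := by omega
      simp [h, ih, h0]
    · have h1 : (count - (a.length : Int)).toNat = (count - ((a.length : Int) + 1)).toNat + 1 := by
        omega
      simp only [h, if_false]
      rw [ih]
      simp [h1, List.take_succ_cons]

-- the k-th address, as a function of the index (Nat form)
def pvF (k : Nat) : String :=
  if k < 6 then "Y" ++ PySem.Int.toStr (k : Int)
  else "Y" ++ PySem.Int.toStr
    (((((k - 6) / 8 + 2) / 8 * 10 + ((k - 6) / 8 + 2) % 8) * 10 + (k - 6) % 8 : Nat) : Int)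

-- the j-th usable group counter value
def pvG (j : Nat) : Nat := (j + 2) / 8 * 10 + (j + 2) % 8

def pvSkipAdj (g : Int) : Int :=
  if PySem.Int.mod g 10 = 8 then g + 2 else if PySem.Int.mod g 10 = 9 then g + 1 else g

-- loop-measure bookkeeping for the fuel argument
def pvSkipPen (group : Int) : Nat :=
  if PySem.Int.mod group 10 = 8 then 2 else if PySem.Int.mod group 10 = 9 then 1 else 0

theorem pvSkipPen_le (g : Int) : pvSkipPen g ≤ 2 := by
  unfold pvSkipPen; split_ifs <;> omega

theorem pvSkipPen_skip_lt (g : Int)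
    (h : PySem.Int.mod g 10 = 8 ∨ PySem.Int.mod g 10 = 9) :
    pvSkipPen (g + 1) < pvSkipPen g := by
  have hm : PySem.Int.mod g 10 = g % 10 := PySem.Int.mod_eq_emod_of_pos (by norm_num)
  have hm1 : PySem.Int.mod (g + 1) 10 = (g + 1) % 10 := PySem.Int.mod_eq_emod_of_pos (by norm_num)
  unfold pvSkipPen
  rw [hm] at h
  rw [hm, hm1]
  split_ifs <;> omega

theorem pvWhileA_done (fuel : Nat) (count : Int) (addrs : List String) (group : Int)
    (h : ¬ ((addrs.length : Int) < count)) :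
    pvWhileA fuel count addrs group = addrs := by
  cases fuel <;> simp [pvWhileA, h]

theorem pvF_block (j i : Nat) (hi : i < 8) :
    pvF (8 * j + 6 + i) = "Y" ++ PySem.Int.toStr ((pvG j : Int) * 10 + (i : Int)) := by
  have h1 : ¬ (8 * j + 6 + i < 6) := by omega
  have h2 : (8 * j + 6 + i) - 6 = 8 * j + i := by omega
  have h3 : (8 * j + i) / 8 = j := by omega
  have h4 : (8 * j + i) % 8 = i := by omega
  simp only [pvF, h1, if_false, h2, h3, h4, pvG]
  congr 2

theorem pvG_cast (j : Nat) : (pvG j : Int) = ((j:Int) + 2) / 8 * 10 + ((j:Int) + 2) % 8 := by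
  unfold pvG; omega

theorem pvRange8 : PySem.List.pyRange 0 8 1 = [0, 1, 2, 3, 4, 5, 6, 7] := by decide

theorem pvRange6 : PySem.List.pyRange 0 6 1 = [0, 1, 2, 3, 4, 5] := by decide

-- ===== B characterisation =====

theorem pvFoldAppend (h : Int → String) :
    ∀ (xs : List Int) (a : List String),
      xs.foldl (fun acc x => acc ++ [h x]) a = a ++ xs.map h := by
  intro xs
  induction xs with
  | nil => intro a; simp
  | cons x xs ih => intro a; simp [ih]

def pvBodyB (k : Int) : String :=
  if k < 6 then "Y" ++ PySem.Int.toStr k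
  else
    let m := k - 6
    let g := PySem.Int.floordiv m 8 + 2
    "Y" ++ PySem.Int.toStr
      ((PySem.Int.floordiv g 8 * 10 + PySem.Int.mod g 8) * 10 + PySem.Int.mod m 8)

theorem pvBodyB_eq (k : Nat) : pvBodyB (k : Int) = pvF k := by
  by_cases hk : k < 6
  · have hk' : (k : Int) < 6 := by exact_mod_cast hk
    simp [pvBodyB, pvF, hk, hk']
  · have hk' : ¬ ((k : Int) < 6) := by omega
    simp only [pvBodyB, pvF, hk, hk', if_false,
      PySem.Int.floordiv_eq_ediv_of_pos (show (0:Int) < 8 by norm_num),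
      PySem.Int.mod_eq_emod_of_pos (show (0:Int) < 8 by norm_num)]
    congr 2
    omega

theorem pvB_eq (count : Int) :
    get_delta_y_addresses_py_alt count = (List.range count.toNat).map pvF := by
  unfold get_delta_y_addresses_py_alt
  have hstep : (fun (a : List String) (k : Int) =>
      if k < 6 then a ++ ["Y" ++ PySem.Int.toStr k]
      else
        let m := k - 6
        let g := PySem.Int.floordiv m 8 + 2
        a ++ ["Y" ++ PySem.Int.toStr
          ((PySem.Int.floordiv g 8 * 10 + PySem.Int.mod g 8) * 10 + PySem.Int.mod m 8)])
      = fun a k => a ++ [pvBodyB k] := by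
    funext a k
    by_cases hk : k < 6 <;> simp [pvBodyB, hk]
  rw [hstep, pvFoldAppend, PySem.List.pyRange_one]
  simp [List.map_map, Function.comp_def, pvBodyB_eq]

-- ===== A characterisation =====

theorem pvSkipAdj_skip (g : Int)
    (h : PySem.Int.mod g 10 = 8 ∨ PySem.Int.mod g 10 = 9) :
    pvSkipAdj (g + 1) = pvSkipAdj g := by
  have hm : PySem.Int.mod g 10 = g % 10 := PySem.Int.mod_eq_emod_of_pos (by norm_num)
  have hm1 : PySem.Int.mod (g + 1) 10 = (g + 1) % 10 := PySem.Int.mod_eq_emod_of_pos (by norm_num)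
  unfold pvSkipAdj
  rw [hm] at h
  rw [hm, hm1]
  split_ifs <;> omega

theorem pvSkipAdj_next (j : Nat) :
    pvSkipAdj ((pvG j : Int) + 1) = (pvG (j + 1) : Int) := by
  have hm1 : PySem.Int.mod ((pvG j : Int) + 1) 10 = ((pvG j : Int) + 1) % 10 :=
    PySem.Int.mod_eq_emod_of_pos (by norm_num)
  unfold pvSkipAdj
  rw [hm1, pvG_cast j, pvG_cast (j + 1)]
  push_cast
  split_ifs <;> omega

theorem pvTakeBlock (j : Nat) : ∀ (r : Nat), r ≤ 8 →
    ((PySem.List.pyRange 0 8 1).take r).map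
        (fun i => "Y" ++ PySem.Int.toStr ((pvG j : Int) * 10 + i))
      = (List.range r).map (fun i => pvF (8 * j + 6 + i)) := by
  intro r hr
  interval_cases r <;>
    simp [pvRange8, List.range_succ, pvF_block j 0 (by norm_num),
      pvF_block j 1 (by norm_num), pvF_block j 2 (by norm_num),
      pvF_block j 3 (by norm_num), pvF_block j 4 (by norm_num),
      pvF_block j 5 (by norm_num), pvF_block j 6 (by norm_num),
      pvF_block j 7 (by norm_num)]

theorem pvBlockAppend (j r : Nat) (hr : r ≤ 8) (addrs : List String)
    (hA : addrs = (List.range addrs.length).map pvF)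
    (hj : addrs.length = 8 * j + 6) :
    addrs ++ ((PySem.List.pyRange 0 8 1).take r).map
        (fun i => "Y" ++ PySem.Int.toStr ((pvG j : Int) * 10 + i))
      = (List.range (addrs.length + r)).map pvF := by
  rw [pvTakeBlock j r hr, List.range_add, List.map_append, List.map_map]
  have : (pvF ∘ fun i => addrs.length + i) = fun i => pvF (8 * j + 6 + i) := by
    funext i; simp [Function.comp, hj]
  rw [this, ← hA]

theorem pvWhileA_eq (count : Int) :
    ∀ (fuel : Nat) (addrs : List String) (group : Int) (j : Nat),
      addrs = (List.range addrs.length).map pvF →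
      (addrs.length : Int) ≤ count →
      addrs.length = 8 * j + 6 →
      pvSkipAdj group = (pvG j : Int) →
      3 * (count - (addrs.length : Int)).toNat + pvSkipPen group < fuel →
      pvWhileA fuel count addrs group = (List.range count.toNat).map pvF := by
  intro fuel
  induction fuel with
  | zero => intro addrs group j _ _ _ _ hfuel; omega
  | succ fuel ih =>
    intro addrs group j hA hL hj hg hfuel
    by_cases hlt : (addrs.length : Int) < count
    · by_cases hskip : PySem.Int.mod group 10 = 8 ∨ PySem.Int.mod group 10 = 9
      · have hstep : pvWhileA (fuel + 1) count addrs group = pvWhileA fuel count addrs (group + 1) := by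
          simp only [pvWhileA, if_pos hlt, if_pos hskip]
        rw [hstep]
        apply ih addrs (group + 1) j hA hL hj
        · rw [pvSkipAdj_skip group hskip, hg]
        · have := pvSkipPen_skip_lt group hskip
          omega
      · have hgg : group = (pvG j : Int) := by
          unfold pvSkipAdj at hg
          rw [if_neg (fun hh => hskip (Or.inl hh)), if_neg (fun hh => hskip (Or.inr hh))] at hg
          exact hg
        have hstep : pvWhileA (fuel + 1) count addrs group = pvWhileA fuel count
            ((PySem.List.pyRange 0 8 1).foldl
              (pvGuardStep count (fun i => "Y" ++ PySem.Int.toStr (group * 10 + i))) addrs)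
            (group + 1) := by
          simp only [pvWhileA, if_pos hlt, if_neg hskip]
        rw [hstep]
        have hfold : ((PySem.List.pyRange 0 8 1).foldl
            (pvGuardStep count (fun i => "Y" ++ PySem.Int.toStr (group * 10 + i))) addrs)
            = addrs ++ ((PySem.List.pyRange 0 8 1).take (count - (addrs.length : Int)).toNat).map
                (fun i => "Y" ++ PySem.Int.toStr ((pvG j : Int) * 10 + i)) := by
          rw [pvGuard_fold_eq, hgg, List.map_take]
        by_cases hbig : (addrs.length : Int) + 8 ≤ count
        · have ht : (PySem.List.pyRange 0 8 1).take (count - (addrs.length : Int)).toNat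
              = (PySem.List.pyRange 0 8 1).take 8 := by
            rw [List.take_of_length_le (by rw [pvRange8]; simp; omega),
                List.take_of_length_le (by rw [pvRange8]; simp)]
          have haddr := pvBlockAppend j 8 (by norm_num) addrs hA hj
          rw [hfold, ht, haddr]
          apply ih _ (group + 1) (j + 1)
          · simp
          · simp; omega
          · simp; omega
          · rw [hgg, pvSkipAdj_next j]
          · have hpen := pvSkipPen_le (group + 1)
            simp
            omega
        · have hr8 : (count - (addrs.length : Int)).toNat ≤ 8 := by omega
          rw [hfold, pvBlockAppend j _ hr8 addrs hA hj]
          have hcnt : addrs.length + (count - (addrs.length : Int)).toNat = count.toNat := by omega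
          rw [hcnt, pvWhileA_done _ _ _ _ (by simp)]
    · have hL' : addrs.length = count.toNat := by omega
      rw [pvWhileA_done _ _ _ _ hlt, hA, hL']

theorem pvPreamble (count : Int) (h0 : 0 < count) :
    (PySem.List.pyRange 0 6 1).foldl
        (pvGuardStep count (fun i => "Y" ++ PySem.Int.toStr i)) []
      = (List.range (min 6 count.toNat)).map pvF := by
  rw [pvGuard_fold_eq]
  simp only [List.length_nil, Nat.cast_zero, sub_zero, List.nil_append]
  by_cases h6 : 6 ≤ count.toNat
  · have hm : min 6 count.toNat = 6 := by omega
    rw [hm, List.take_of_length_le (by rw [pvRange6]; simp; omega)]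
    decide
  · have hm : min 6 count.toNat = count.toNat := by omega
    rw [hm]
    have h1 : 1 ≤ count.toNat := by omega
    have h5 : count.toNat < 6 := by omega
    interval_cases (count.toNat) <;> decide

-- ===== VERDICT (by name: the statement is the Claim_ definition above) =====
theorem get_delta_y_addresses_py_spec : Claim_equal_get_delta_y_addresses_py := by
  unfold Claim_equal_get_delta_y_addresses_py Spec_get_delta_y_addresses_py
  intro count _
  rw [pvB_eq]
  unfold get_delta_y_addresses_py
  by_cases hc : count ≤ 0
  · rw [if_pos hc]
    have : count.toNat = 0 := by omega
    simp [this]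
  · rw [if_neg hc]
    have h0 : 0 < count := by omega
    rw [pvPreamble count h0]
    by_cases h6 : (6 : Int) ≤ count
    · have hm : min 6 count.toNat = 6 := by omega
      rw [hm]
      apply pvWhileA_eq count _ _ 2 0
      · simp
      · simp; omega
      · simp
      · decide
      · have : pvSkipPen 2 = 0 := by decide
        simp [this]
        omega
    · have hm : min 6 count.toNat = count.toNat := by omega
      rw [hm, pvWhileA_done _ _ _ _ (by simp)]
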